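-- pv_equiv track=rewrite | github.com/albaraasalem/MiniEncyclopedia | main.py | erase_words
-- ===== SOURCE A (Python) =====
-- def has_period(string):
--     for i in string:
--         if i == ".":
--             return True
--
-- def erase_words(lst):
--     n = lst.split()
--     count = 0
--     for i in reversed(n):
--         if(has_period(i) == True):
--             break
--         else:
--             count +=1
--
--     diff = len(n) - count
--     n = n[:diff]
--     #now the string ends with a period
--     n = " ".join(n)
--     return n
-- ===== SOURCE B (Python) =====
-- def erase_words(lst):
--     words = lst.split()
--     last_idx = -1
--     for i, w in enumerate(words):
--         if "." in w:
--             last_idx = i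
--     return " ".join(words[:last_idx + 1])
-- ===== Notes on version B (the rewrite author's own statement) =====
-- stated objective: simpler
-- what changed: Replaces the reversed scan with break plus count/len arithmetic and a hand-written character-by-character period search by a single forward pass that remembers the last index of a word containing a period (via the in operator) and slices up to it.
import Mathlib
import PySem

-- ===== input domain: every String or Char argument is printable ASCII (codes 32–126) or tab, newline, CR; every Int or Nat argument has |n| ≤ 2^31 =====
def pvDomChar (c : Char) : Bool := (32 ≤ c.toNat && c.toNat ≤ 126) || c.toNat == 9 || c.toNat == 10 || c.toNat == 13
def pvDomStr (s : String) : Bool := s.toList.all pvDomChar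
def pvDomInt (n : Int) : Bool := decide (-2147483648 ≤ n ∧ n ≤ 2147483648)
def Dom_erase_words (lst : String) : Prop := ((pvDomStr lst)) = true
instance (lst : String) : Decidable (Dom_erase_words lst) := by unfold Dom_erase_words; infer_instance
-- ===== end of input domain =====

-- B replaces A's reversed break-and-count scan (plus a hand-written period search) by one
-- forward pass remembering the last index of a word containing "."; objective: simpler.

-- ===== PORT A =====
-- for i in string: if i == ".": return True   (None otherwise; '== True' makes it a Bool test)
def has_period (s : List Char) : Bool :=
  match s with
  | [] => false
  | c :: rest => if c == '.' then true else has_period rest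

-- the reversed loop with break: counts trailing words without a period
def eraseCountLoop (ws : List String) : Nat :=
  match ws with
  | [] => 0
  | w :: rest => if has_period w.toList then 0 else 1 + eraseCountLoop rest

def erase_words (lst : String) : String :=
  let n := PySem.Str.split₀ lst
  let count := eraseCountLoop n.reverse
  let diff : Int := (n.length : Int) - (count : Int)
  PySem.Str.join " " (PySem.List.slice n none (some diff))

-- ===== PORT B =====
def erase_words_alt (lst : String) : String :=
  let words := PySem.Str.split₀ lst
  let last_idx : Int :=
    (PySem.List.enumerate words).foldl
      (fun acc p => if PySem.Str.isIn "." p.2 then p.1 else acc) (-1)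
  PySem.Str.join " " (PySem.List.slice words none (some (last_idx + 1)))

-- ===== PRECONDITION & SPEC =====
def Spec_erase_words (lst : String) (out : String) : Prop := out = erase_words_alt lst
instance (lst : String) (out : String) : Decidable (Spec_erase_words lst out) := by unfold Spec_erase_words; infer_instance

-- ===== CLAIM (what is proved, stated in full; the proofs are below) =====
def Claim_equal_erase_words : Prop := ∀ (lst : String), Dom_erase_words lst → Spec_erase_words lst (erase_words lst)

-- ===== LEMMAS AND PROOFS =====

theorem has_period_iff (cs : List Char) : has_period cs = true ↔ '.' ∈ cs := by
  induction cs with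
  | nil => simp [has_period]
  | cons c rest ih =>
    simp only [has_period, List.mem_cons]
    by_cases h : c = '.'
    · simp [h]
    · have hb : (c == '.') = false := by simp [h]
      rw [hb]
      simp only [Bool.false_eq_true, if_false, ih]
      constructor
      · exact Or.inr
      · rintro (h1 | h2)
        · exact absurd h1.symm h
        · exact h2

theorem isIn_dot_iff (w : String) : PySem.Str.isIn "." w = true ↔ '.' ∈ w.toList := by
  rw [PySem.Str.isIn_iff_infix,
    show ("." : String).toList = ['.'] from rfl, List.singleton_infix_iff]

theorem has_period_eq_isIn (w : String) :
    has_period w.toList = PySem.Str.isIn "." w := by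
  have hiff : has_period w.toList = true ↔ PySem.Str.isIn "." w = true :=
    (has_period_iff _).trans (isIn_dot_iff _).symm
  cases ha : has_period w.toList <;> cases hb : PySem.Str.isIn "." w <;> simp_all

def lastIdxFold (ws : List String) : Int :=
  (PySem.List.enumerate ws).foldl
    (fun acc p => if PySem.Str.isIn "." p.2 then p.1 else acc) (-1)

-- forward last-match fold with a general start and accumulator, for the induction step
theorem foldl_last_append (ys : List String) (w : String) (s : Int) :
    (PySem.List.enumerate (ys ++ [w]) s).foldl
      (fun acc p => if PySem.Str.isIn "." p.2 then p.1 else acc) (-1)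
    = if PySem.Str.isIn "." w then s + ys.length
      else (PySem.List.enumerate ys s).foldl
        (fun acc p => if PySem.Str.isIn "." p.2 then p.1 else acc) (-1) := by
  rw [PySem.List.enumerate_append, PySem.List.enumerate_cons, PySem.List.enumerate_nil,
    List.foldl_append]
  simp only [List.foldl_cons, List.foldl_nil]

-- the bridge: A's slice bound equals B's slice bound
theorem key (ws : List String) :
    (ws.length : Int) - (eraseCountLoop ws.reverse : Int) = lastIdxFold ws + 1 := by
  induction ws using List.reverseRecOn with
  | nil =>
    simp [eraseCountLoop, lastIdxFold, PySem.List.enumerate_nil]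
  | append_singleton ys w ih =>
    unfold lastIdxFold at ih ⊢
    rw [foldl_last_append]
    rw [List.reverse_append, List.reverse_singleton, List.singleton_append]
    simp only [eraseCountLoop, has_period_eq_isIn]
    split_ifs with h
    · simp
    · rw [← ih]
      simp only [List.length_append, List.length_singleton]
      push_cast
      omega

-- ===== VERDICT (by name: the statement is the Claim_ definition above) =====
theorem erase_words_spec : Claim_equal_erase_words := by
  intro lst _
  show erase_words lst = erase_words_alt lst
  simp only [erase_words, erase_words_alt]
  rw [key (PySem.Str.split₀ lst)]
  rfl
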